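-- pv_equiv track=rewrite | github.com/FAN1215FAN/HEEG_Auto | scripts/import_heeg_v2_assets.py | unicode_slug
-- ===== SOURCE A (Python) =====
-- def unicode_slug(text: str) -> str:
--     chunks = []
--     for char in text:
--         if char.isascii() and char.isalnum():
--             chunks.append(char.lower())
--         elif char.isspace():
--             chunks.append('_')
--         else:
--             chunks.append(f'u{ord(char):x}')
--     slug = ''.join(chunks)
--     while '__' in slug:
--         slug = slug.replace('__', '_')
--     return slug.strip('_') or 'asset'
-- ===== SOURCE B (Python) =====
-- def unicode_slug(text: str) -> str:
--     # One tokenizing pass: collect words (never emitting empty ones), join with '_'.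
--     words = []
--     buf = ''
--     for char in text:
--         if char.isspace():
--             if buf:
--                 words.append(buf)
--                 buf = ''
--         elif char.isascii() and char.isalnum():
--             buf += char.lower()
--         else:
--             buf += f'u{ord(char):x}'
--     if buf:
--         words.append(buf)
--     return '_'.join(words) or 'asset'
-- ===== Notes on version B (the rewrite author's own statement) =====
-- stated objective: alternative
-- what changed: A builds the full per-char token string, then repeatedly replaces double underscores by single ones until none remain and strips edge underscores; B does a single tokenizing pass that flushes a word buffer on whitespace and joins the non-empty words with underscores, so no collapse/strip post-processing is needed.
import Mathlib
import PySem

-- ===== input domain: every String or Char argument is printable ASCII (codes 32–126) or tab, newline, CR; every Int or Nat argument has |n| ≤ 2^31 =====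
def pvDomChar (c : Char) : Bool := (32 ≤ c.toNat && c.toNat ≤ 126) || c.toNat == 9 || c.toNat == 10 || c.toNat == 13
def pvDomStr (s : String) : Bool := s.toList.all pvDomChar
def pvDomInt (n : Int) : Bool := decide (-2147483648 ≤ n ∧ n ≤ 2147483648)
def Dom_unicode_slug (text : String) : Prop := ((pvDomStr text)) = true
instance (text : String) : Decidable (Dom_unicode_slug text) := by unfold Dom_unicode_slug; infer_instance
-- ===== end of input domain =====

-- B replaces A's build-then-collapse-then-strip pipeline with a single word-tokenizing pass
-- (buffer flushed to a word list on whitespace, words joined with '_'); same return value.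

-- ===== PORT A =====
-- f'u{ord(char):x}': lowercase hex digits of a Nat (n = 0 gives "0"); hand-ported, exact for every Nat.

def pvHexDigit (n : Nat) : Char := if n < 10 then Char.ofNat (48 + n) else Char.ofNat (87 + n)

def pvHexRev : Nat → List Char
  | 0 => []
  | n + 1 => pvHexDigit ((n + 1) % 16) :: pvHexRev ((n + 1) / 16)
decreasing_by exact Nat.div_lt_self (Nat.succ_pos n) (by norm_num)

def pvHex (n : Nat) : List Char := if n = 0 then ['0'] else (pvHexRev n).reverse

-- per-char chunk of the loop body of A (branch order as in A)
def pvTokA (c : Char) : List Char :=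
  if c.toNat ≤ 127 && PySem.Chars.isalnum c then [PySem.Chars.lowerChar c]
  else if PySem.Chars.isspace c then ['_']
  else 'u' :: pvHex c.toNat

-- termination helpers for the while-loop: one pass of slug.replace('__', '_')
def pvRep : List Char → List Char
  | '_' :: '_' :: t => '_' :: pvRep t
  | c :: t => c :: pvRep t
  | [] => []

theorem pvRep_cons2 (t : List Char) : pvRep ('_' :: '_' :: t) = '_' :: pvRep t := rfl

theorem pvRep_cons_of_not2 (c : Char) (t : List Char)
    (h : ¬ (c = '_' ∧ t.head? = some '_')) : pvRep (c :: t) = c :: pvRep t := by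
  rw [pvRep.eq_def]
  split
  · rename_i t' heq; injection heq with h1 h2; subst h1; subst h2; exact absurd ⟨rfl, rfl⟩ h
  · rename_i c' t' hne heq; injection heq with h1 h2; subst h1; subst h2; rfl
  · rename_i heq; cases heq

theorem pvRep_go (fuel : Nat) : ∀ (l acc : List Char), l.length ≤ fuel →
    PySem.Chars.replace.go ['_', '_'] ['_'] fuel l acc = acc.reverse ++ pvRep l := by
  induction fuel with
  | zero => intro l acc h; rw [PySem.Chars.replace.go.eq_def]
            simp at h; subst h; simp [pvRep]
  | succ n ih =>
    intro l acc h
    match l with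
    | [] => rw [PySem.Chars.replace.go.eq_def]; simp [pvRep]
    | c :: t =>
      rw [PySem.Chars.replace.go.eq_def]
      by_cases hp : List.isPrefixOf ['_', '_'] (c :: t) = true
      · simp only [hp, if_pos]
        obtain ⟨u, hu⟩ := List.isPrefixOf_iff_prefix.mp hp
        match t, hu with
        | _ :: t', hu =>
          injection hu with h1 h2
          injection h2 with h2a h2b
          subst h1; subst h2a; subst h2b
          simp at h
          rw [ih _ _ (by simpa using Nat.le_of_succ_le h)]
          simp [pvRep_cons2]
      · simp only [hp, if_neg, Bool.false_eq_true, not_false_iff, if_false]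
        rw [ih t (c :: acc) (by simpa using h)]
        rw [pvRep_cons_of_not2 c t]
        · simp
        · rintro ⟨rfl, hh⟩
          match t, hh with
          | _ :: t', rfl => exact hp (by simp [List.isPrefixOf])

theorem pvReplace_eq_rep (s : List Char) :
    PySem.Chars.replace s ['_', '_'] ['_'] = pvRep s := by
  rw [PySem.Chars.replace]
  simp only [List.isEmpty_cons, Bool.false_eq_true, if_false]
  exact (pvRep_go s.length s [] le_rfl).trans (by simp)

theorem pvRep_length_le (s : List Char) : (pvRep s).length ≤ s.length := by
  induction s using pvRep.induct with
  | case1 t ih => simp [pvRep_cons2]; omega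
  | case2 c t h ih =>
      rw [pvRep_cons_of_not2 c t (by intro hc; obtain ⟨rfl, hh⟩ := hc; match t, hh with
        | _ :: t', rfl => exact h t' rfl rfl)]
      simpa using ih
  | case3 => simp [pvRep]

theorem pvRep_length_lt (s : List Char) (h : ['_', '_'] <:+: s) :
    (pvRep s).length < s.length := by
  induction s using pvRep.induct with
  | case1 t ih => have := pvRep_length_le t; simp [pvRep_cons2]; omega
  | case2 c t hn ih =>
      have hnot : ¬ (c = '_' ∧ t.head? = some '_') := by
        intro hc; obtain ⟨rfl, hh⟩ := hc
        match t, hh with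
        | _ :: t', rfl => exact hn t' rfl rfl
      rw [pvRep_cons_of_not2 c t hnot]
      rcases List.infix_cons_iff.mp h with hpre | hinf
      · exfalso
        obtain ⟨u, hu⟩ := hpre
        injection hu with h1 h2
        exact hnot ⟨h1.symm, by cases h2; rfl⟩
      · have := ih hinf; simpa using this
  | case3 => simp at h

-- while '__' in slug: slug = slug.replace('__', '_')
def pvCollapse (s : List Char) : List Char :=
  if h : PySem.Chars.isIn ['_', '_'] s = true then
    pvCollapse (PySem.Chars.replace s ['_', '_'] ['_'])
  else s
termination_by s.length
decreasing_by
  rw [pvReplace_eq_rep]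
  exact pvRep_length_lt s ((PySem.Chars.isIn_iff_infix _ _).mp h)

def unicode_slug (text : String) : String :=
  let chunks := text.toList.foldl (fun acc c => acc ++ [pvTokA c]) []
  let slug := PySem.Chars.join [] chunks
  let slug2 := pvCollapse slug
  let res := PySem.Chars.stripChars slug2 ['_']
  if res.isEmpty then "asset" else String.ofList res

-- ===== PORT B =====
-- one pass: flush the word buffer on whitespace, otherwise extend it with the mapped char
def pvStepB (st : List (List Char) × List Char) (c : Char) : List (List Char) × List Char :=
  if PySem.Chars.isspace c then
    if st.2.isEmpty then st else (st.1 ++ [st.2], [])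
  else if c.toNat ≤ 127 && PySem.Chars.isalnum c then (st.1, st.2 ++ [PySem.Chars.lowerChar c])
  else (st.1, st.2 ++ ('u' :: pvHex c.toNat))

def unicode_slug_alt (text : String) : String :=
  let st := text.toList.foldl pvStepB ([], [])
  let words := if st.2.isEmpty then st.1 else st.1 ++ [st.2]
  let res := PySem.Chars.join ['_'] words
  if res.isEmpty then "asset" else String.ofList res

-- ===== PRECONDITION & SPEC =====
def Spec_unicode_slug (text : String) (out : String) : Prop := out = unicode_slug_alt text
instance (text : String) (out : String) : Decidable (Spec_unicode_slug text out) := by unfold Spec_unicode_slug; infer_instance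

-- ===== CLAIM (what is proved, stated in full; the proofs are below) =====
def Claim_equal_unicode_slug : Prop := ∀ (text : String), Dom_unicode_slug text → Spec_unicode_slug text (unicode_slug text)

-- ===== LEMMAS AND PROOFS =====
def pvSq1 (acc : List Char) (c : Char) : List Char :=
  if c = '_' ∧ acc.getLast? = some '_' then acc else acc ++ [c]

def pvSq (s : List Char) : List Char := s.foldl pvSq1 []

theorem pvSq1_underscore_last (a : List Char) : (pvSq1 a '_').getLast? = some '_' := by
  unfold pvSq1
  split
  · rename_i hc; exact hc.2
  · simp

theorem pvFoldl_rep (s : List Char) : ∀ a : List Char,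
    (pvRep s).foldl pvSq1 a = s.foldl pvSq1 a := by
  induction s using pvRep.induct with
  | case1 t ih =>
      intro a
      rw [pvRep_cons2]
      have hkey : pvSq1 (pvSq1 a '_') '_' = pvSq1 a '_' := by
        conv_lhs => rw [pvSq1]
        rw [if_pos ⟨rfl, pvSq1_underscore_last a⟩]
      rw [List.foldl_cons, List.foldl_cons, List.foldl_cons, hkey, ih]
  | case2 c t hn ih =>
      intro a
      rw [pvRep_cons_of_not2 c t (by intro hc; obtain ⟨rfl, hh⟩ := hc; match t, hh with
        | _ :: t', rfl => exact hn t' rfl rfl)]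
      simp only [List.foldl_cons]
      exact ih _
  | case3 => intro a; simp [pvRep]

theorem pvSq_fix_aux (t : List Char) : ∀ a : List Char,
    ¬ ['_', '_'] <:+: t → (a.getLast? = some '_' → t.head? ≠ some '_') →
    t.foldl pvSq1 a = a ++ t := by
  induction t with
  | nil => intro a _ _; simp
  | cons c t ih =>
      intro a hinf hb
      simp only [List.foldl_cons]
      have hstep : pvSq1 a c = a ++ [c] := by
        unfold pvSq1
        rw [if_neg]
        rintro ⟨rfl, hl⟩
        exact hb hl rfl
      rw [hstep, ih (a ++ [c])]
      · simp
      · intro hc; exact hinf (List.infix_cons_iff.mpr (Or.inr hc))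
      · intro hl hh
        simp at hl
        cases t with
        | nil => simp at hh
        | cons d t' =>
          simp at hh
          subst hl; subst hh
          exact hinf (List.infix_cons_iff.mpr (Or.inl ⟨t', rfl⟩))

theorem pvSq_fix (s : List Char) (h : ¬ ['_', '_'] <:+: s) : pvSq s = s := by
  unfold pvSq
  rw [pvSq_fix_aux s [] h (by simp)]
  simp

theorem pvCollapse_eq_sq (s : List Char) : pvCollapse s = pvSq s := by
  have H : ∀ n, ∀ s : List Char, s.length ≤ n → pvCollapse s = pvSq s := by
    intro n
    induction n with
    | zero =>
        intro s hs
        simp at hs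
        subst hs
        rw [pvCollapse]
        split
        · rename_i h; exact absurd ((PySem.Chars.isIn_iff_infix _ _).mp h) (by simp)
        · simp [pvSq]
    | succ n ih =>
        intro s hs
        rw [pvCollapse]
        split
        · rename_i h
          rw [pvReplace_eq_rep]
          have hlt := pvRep_length_lt s ((PySem.Chars.isIn_iff_infix _ _).mp h)
          rw [ih _ (by omega)]
          unfold pvSq
          exact pvFoldl_rep s []
        · rename_i h
          have : ¬ ['_', '_'] <:+: s := by
            rw [← PySem.Chars.isIn_iff_infix]
            simpa using h
          exact (pvSq_fix s this).symm
  exact H s.length s le_rfl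

theorem pvHexDigit_ne (n : Nat) (h : n < 16) : pvHexDigit n ≠ '_' := by
  interval_cases n <;> decide

theorem pvHexRev_no_us (n : Nat) : '_' ∉ pvHexRev n := by
  induction n using pvHexRev.induct with
  | case1 => simp [pvHexRev]
  | case2 n ih =>
      rw [pvHexRev]
      simp only [List.mem_cons, not_or]
      exact ⟨fun h => pvHexDigit_ne _ (Nat.mod_lt _ (by norm_num)) h.symm, ih⟩

theorem pvHex_no_us (n : Nat) : '_' ∉ pvHex n := by
  unfold pvHex
  split
  · decide
  · simpa using pvHexRev_no_us n

theorem pvSpace_not_alnum (c : Char) (h : PySem.Chars.isspace c = true) :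
    PySem.Chars.isalnum c = false := by
  unfold PySem.Chars.isspace at h
  unfold PySem.Chars.isalnum PySem.Chars.isalpha PySem.Chars.isdigit
    PySem.Chars.isupper PySem.Chars.islower
  simp only [Bool.or_eq_true, Bool.and_eq_true, decide_eq_true_eq] at h
  simp only [Bool.or_eq_false_iff, Bool.and_eq_false_iff, decide_eq_false_iff_not,
    Char.le_def, UInt32.le_iff_toNat_le]
  have h0 : ('0' : Char).val.toNat = 48 := by decide
  have h9 : ('9' : Char).val.toNat = 57 := by decide
  have hA : ('A' : Char).val.toNat = 65 := by decide
  have hZ : ('Z' : Char).val.toNat = 90 := by decide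
  have ha : ('a' : Char).val.toNat = 97 := by decide
  have hz : ('z' : Char).val.toNat = 122 := by decide
  rw [h0, h9, hA, hZ, ha, hz]
  have : c.toNat = c.val.toNat := rfl
  omega

theorem pvTokA_space (c : Char) (h : PySem.Chars.isspace c = true) : pvTokA c = ['_'] := by
  unfold pvTokA
  rw [pvSpace_not_alnum c h]
  simp [h]

theorem pvLowerChar_ne_us (c : Char) (h : PySem.Chars.isalnum c = true) :
    PySem.Chars.lowerChar c ≠ '_' := by
  unfold PySem.Chars.lowerChar
  split
  · rename_i hu
    unfold PySem.Chars.isupper at hu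
    simp only [Bool.and_eq_true, decide_eq_true_eq, Char.le_def, UInt32.le_iff_toNat_le] at hu
    have hA : ('A' : Char).val.toNat = 65 := by decide
    have hZ : ('Z' : Char).val.toNat = 90 := by decide
    have hc1 : 65 ≤ c.toNat := by rw [← hA]; exact hu.1
    have hc2 : c.toNat ≤ 90 := by rw [← hZ]; exact hu.2
    intro hc
    have h95 : (Char.ofNat (c.toNat + 32)).toNat = c.toNat + 32 := by
      rw [Char.toNat_ofNat, if_pos]
      exact Or.inl (by omega)
    have := congrArg Char.toNat hc
    rw [h95] at this
    have h_ : ('_' : Char).toNat = 95 := by decide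
    omega
  · intro hc
    subst hc
    exact absurd h (by decide)

theorem pvTokA_nonspace (c : Char) (h : PySem.Chars.isspace c = false) :
    pvTokA c ≠ [] ∧ '_' ∉ pvTokA c := by
  unfold pvTokA
  split
  · rename_i ha
    simp only [ne_eq, List.cons_ne_nil, not_false_iff, List.mem_singleton, true_and]
    intro hc
    exact pvLowerChar_ne_us c (by simpa using (Bool.and_eq_true _ _).mp ha |>.2) hc.symm
  · rw [h]
    simp only [Bool.false_eq_true, if_false, ne_eq, List.cons_ne_nil, not_false_iff,
      List.mem_cons, not_or, true_and]
    exact ⟨by decide, pvHex_no_us _⟩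

def pvJoinU (ws : List (List Char)) : List Char := PySem.Chars.join ['_'] ws

theorem pvJoinU_nil : pvJoinU [] = [] := by simp [pvJoinU, PySem.Chars.join, List.intercalate]

theorem pvJoinU_singleton (w : List Char) : pvJoinU [w] = w := by
  simp [pvJoinU, PySem.Chars.join, List.intercalate]

theorem pvJoinU_cons_cons (w y : List Char) (t : List (List Char)) :
    pvJoinU (w :: y :: t) = w ++ '_' :: pvJoinU (y :: t) := by
  simp [pvJoinU, PySem.Chars.join, List.intercalate, List.intersperse]

theorem pvJoinU_snoc (ws : List (List Char)) (x : List Char) :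
    pvJoinU (ws ++ [x]) = if ws = [] then x else pvJoinU ws ++ '_' :: x := by
  induction ws with
  | nil => simp [pvJoinU_singleton]
  | cons w rest ih =>
      cases rest with
      | nil => simp [pvJoinU_cons_cons, pvJoinU_singleton]
      | cons y t =>
          have h1 : (w :: y :: t) ++ [x] = w :: (y :: (t ++ [x])) := by simp
          rw [h1, pvJoinU_cons_cons w y (t ++ [x])]
          have h2 : y :: (t ++ [x]) = (y :: t) ++ [x] := by simp
          rw [h2, ih]
          simp [pvJoinU_cons_cons]

theorem pvJoinNilFlat (l : List (List Char)) : PySem.Chars.join [] l = l.flatten := by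
  induction l with
  | nil => simp [PySem.Chars.join, List.intercalate]
  | cons w t ih =>
      cases t with
      | nil => simp [PySem.Chars.join, List.intercalate]
      | cons y u =>
          have : PySem.Chars.join [] (w :: y :: u) = w ++ PySem.Chars.join [] (y :: u) := by
            simp [PySem.Chars.join, List.intercalate, List.intersperse]
          rw [this, ih]
          simp

theorem pvJoinU_head (words : List (List Char)) (hp : ∀ w ∈ words, w ≠ [] ∧ '_' ∉ w)
    (h : Char) (hh : (pvJoinU words).head? = some h) : h ≠ '_' := by
  cases words with
  | nil => rw [pvJoinU_nil] at hh; simp at hh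
  | cons w rest =>
      have hw := hp w (by simp)
      have hjoin : ∃ z, pvJoinU (w :: rest) = w ++ z := by
        cases rest with
        | nil => exact ⟨[], by simp [pvJoinU_singleton]⟩
        | cons y t => exact ⟨'_' :: pvJoinU (y :: t), pvJoinU_cons_cons w y t⟩
      obtain ⟨z, hz⟩ := hjoin
      rw [hz] at hh
      match w, hw, hh with
      | c :: w', hw, hh =>
          simp at hh
          subst hh
          exact fun hc => hw.2 (by simp [hc])

theorem pvJoinU_last (words : List (List Char)) (hp : ∀ w ∈ words, w ≠ [] ∧ '_' ∉ w)
    (h : Char) (hh : (pvJoinU words).getLast? = some h) : h ≠ '_' := by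
  induction words using List.reverseRecOn with
  | nil => rw [pvJoinU_nil] at hh; simp at hh
  | append_singleton ws w ih =>
      have hw := hp w (by simp)
      rw [pvJoinU_snoc] at hh
      split at hh
      · exact fun hc => hw.2 (List.mem_of_getLast? (hc ▸ hh))
      · rw [List.getLast?_append] at hh
        have hwl : ('_' :: w).getLast? = w.getLast? := by
          match w, hw with
          | c :: w', _ => simp
        rw [hwl] at hh
        have : w.getLast? = some h := by
          cases hg : w.getLast? with
          | none => exact absurd (List.getLast?_eq_none_iff.mp hg) hw.1
          | some a =>
              rw [hg] at hh; simp at hh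
              exact congrArg some hh
        exact fun hc => hw.2 (List.mem_of_getLast? (by rw [← hc]; exact this))

def pvE (ws : List (List Char)) (buf : List Char) : List Char :=
  if buf = [] then (if ws = [] then [] else pvJoinU ws ++ ['_']) else pvJoinU (ws ++ [buf])

-- the step of B agrees with appending A's chunk, at the level of the squeezed slug

theorem pvFoldl_no_us (w : List Char) (hw : '_' ∉ w) : ∀ a, w.foldl pvSq1 a = a ++ w := by
  induction w with
  | nil => intro a; simp
  | cons c t ih =>
      intro a
      simp only [List.foldl_cons]
      have : pvSq1 a c = a ++ [c] := by
        unfold pvSq1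
        rw [if_neg]
        rintro ⟨rfl, -⟩
        exact hw (by simp)
      rw [this, ih (fun hm => hw (by simp [hm]))]
      simp

theorem pvInv (t : List Char) :
    (∀ w ∈ (t.foldl pvStepB ([], [])).1, w ≠ [] ∧ '_' ∉ w) ∧
    '_' ∉ (t.foldl pvStepB ([], [])).2 ∧
    ∃ b : Bool, pvSq ((t.map pvTokA).flatten) =
      (cond b ['_'] []) ++ pvE (t.foldl pvStepB ([], [])).1 (t.foldl pvStepB ([], [])).2 := by
  induction t using List.reverseRecOn with
  | nil => exact ⟨by simp, by simp, false, by simp [pvSq, pvE, pvJoinU_nil]⟩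
  | append_singleton t c ih =>
      obtain ⟨hws, hbuf, b, hsq⟩ := ih
      set st := t.foldl pvStepB ([], []) with hst
      have hfold : (t ++ [c]).foldl pvStepB ([], []) = pvStepB st c := by
        rw [List.foldl_append]; rfl
      have hsq' : pvSq (((t ++ [c]).map pvTokA).flatten)
          = (pvTokA c).foldl pvSq1 (pvSq ((t.map pvTokA).flatten)) := by
        have hflat : ((t ++ [c]).map pvTokA).flatten = (t.map pvTokA).flatten ++ pvTokA c := by
          simp
        rw [hflat]; unfold pvSq; rw [List.foldl_append]
      by_cases hsp : PySem.Chars.isspace c = true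
      · -- whitespace char: A's chunk is ['_'], B flushes the buffer
        have htok : pvTokA c = ['_'] := pvTokA_space c hsp
        rw [hfold]
        unfold pvStepB
        rw [if_pos hsp]
        by_cases hb : st.2.isEmpty
        · rw [if_pos hb]
          have hbe : st.2 = [] := by simpa using hb
          by_cases hw : st.1 = []
          · refine ⟨hws, by simp [hbe], true, ?_⟩
            rw [hsq', htok]
            simp only [List.foldl_cons, List.foldl_nil]
            rw [hsq, hbe]
            simp only [pvE, hw, if_pos rfl]
            unfold pvSq1
            cases b <;> simp
          · refine ⟨hws, by simp [hbe], b, ?_⟩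
            rw [hsq', htok]
            simp only [List.foldl_cons, List.foldl_nil]
            rw [hsq, hbe]
            simp only [pvE, hw, if_pos rfl, if_neg hw]
            unfold pvSq1
            rw [if_pos ⟨rfl, by simp⟩]
        · rw [if_neg hb]
          have hbe : st.2 ≠ [] := by simpa using hb
          have hpure : ∀ w ∈ st.1 ++ [st.2], w ≠ [] ∧ '_' ∉ w := by
            intro w hw
            rcases List.mem_append.mp hw with h | h
            · exact hws w h
            · simp at h; subst h; exact ⟨hbe, hbuf⟩
          refine ⟨hpure, by simp, b, ?_⟩
          rw [hsq', htok]
          simp only [List.foldl_cons, List.foldl_nil]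
          rw [hsq]
          simp only [pvE, hbe, if_neg hbe, if_pos rfl,
            if_neg (show ¬ st.1 ++ [st.2] = [] by simp)]
          have hlast : ((cond b ['_'] []) ++ pvJoinU (st.1 ++ [st.2])).getLast? ≠ some '_' := by
            intro hl
            have hne : pvJoinU (st.1 ++ [st.2]) ≠ [] := by
              rw [pvJoinU_snoc]
              split
              · exact hbe
              · intro hx
                exact absurd (List.append_eq_nil_iff.mp hx).2 (by simp)
            rw [List.getLast?_append, Option.or_of_isSome] at hl
            · exact pvJoinU_last (st.1 ++ [st.2]) hpure '_' hl rfl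
            · simpa [Option.isSome_iff_ne_none, ne_eq, List.getLast?_eq_none_iff] using hne
          unfold pvSq1
          rw [if_neg (fun hc => hlast hc.2)]
          simp
      · -- non-whitespace: A's chunk is nonempty and '_'-free, B extends the buffer with it
        have hsp' : PySem.Chars.isspace c = false := by simpa using hsp
        obtain ⟨hne, hnus⟩ := pvTokA_nonspace c hsp'
        have htok' : pvStepB st c = (st.1, st.2 ++ pvTokA c) := by
          by_cases hal : (c.toNat ≤ 127 && PySem.Chars.isalnum c) = true
          · simp [pvStepB, pvTokA, hsp', hal]
          · simp [pvStepB, pvTokA, hsp', hal]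
        rw [hfold, htok']
        refine ⟨hws, fun hm => (List.mem_append.mp hm).elim (fun h => hbuf h) (fun h => hnus h),
          b, ?_⟩
        rw [hsq', pvFoldl_no_us _ hnus, hsq]
        have hnetok : st.2 ++ pvTokA c ≠ [] := fun hx => hne (List.append_eq_nil_iff.mp hx).2
        by_cases hbe : st.2 = []
        · by_cases hw : st.1 = []
          · simp [pvE, hbe, hw, hnetok, pvJoinU_snoc, pvJoinU_nil, hne, pvJoinU_singleton]
          · simp [pvE, hbe, hw, hnetok, pvJoinU_snoc, List.append_assoc]
        · by_cases hw : st.1 = []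
          · simp [pvE, hbe, hw, hnetok, pvJoinU_snoc, pvJoinU_singleton, List.append_assoc]
          · simp [pvE, hbe, hw, hnetok, pvJoinU_snoc, List.append_assoc]

theorem pvDropWhile_eq_self_of_head {p : Char → Bool} (x : List Char)
    (h : ∀ c, x.head? = some c → p c = false) : List.dropWhile p x = x := by
  cases x with
  | nil => rfl
  | cons c t => rw [List.dropWhile_cons_of_neg (by simp [h c rfl])]

theorem pvStrip (ws : List (List Char)) (buf : List Char)
    (hws : ∀ w ∈ ws, w ≠ [] ∧ '_' ∉ w) (hbuf : '_' ∉ buf) (b : Bool) :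
    PySem.Chars.stripChars ((cond b ['_'] []) ++ pvE ws buf) ['_']
      = pvJoinU (if buf = [] then ws else ws ++ [buf]) := by
  unfold PySem.Chars.stripChars
  dsimp only
  have hp : (fun c => List.contains ['_'] c) = (fun c : Char => c == '_') := by
    funext c; by_cases h : c = '_' <;> simp [h]
  rw [hp]
  have hdrop1 : List.dropWhile (fun c : Char => c == '_') ((cond b ['_'] []) ++ pvE ws buf)
      = List.dropWhile (fun c : Char => c == '_') (pvE ws buf) := by
    cases b with
    | false => rfl
    | true => simp [List.dropWhile_cons]
  rw [hdrop1]
  by_cases hbe : buf = []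
  · subst hbe
    by_cases hw : ws = []
    · subst hw
      simp [pvE, pvJoinU_nil]
    · simp only [pvE, if_pos rfl, if_neg hw, eq_self_iff_true, if_true]
      have hpure := hws
      have hhead : List.dropWhile (fun c : Char => c == '_') (pvJoinU ws ++ ['_'])
          = pvJoinU ws ++ ['_'] := by
        apply pvDropWhile_eq_self_of_head
        intro c hc
        have hjne : pvJoinU ws ≠ [] := by
          match ws, hw with
          | w :: rest, _ =>
            have hwp := hws w (by simp)
            intro hx
            have : ∃ z, pvJoinU (w :: rest) = w ++ z := by
              cases rest with
              | nil => exact ⟨[], by simp [pvJoinU_singleton]⟩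
              | cons y t => exact ⟨'_' :: pvJoinU (y :: t), pvJoinU_cons_cons w y t⟩
            obtain ⟨z, hz⟩ := this
            rw [hz] at hx
            exact hwp.1 (List.append_eq_nil_iff.mp hx).1
        rw [List.head?_append, Option.or_of_isSome (by
          simpa [Option.isSome_iff_ne_none, ne_eq, List.head?_eq_none_iff] using hjne)] at hc
        simpa using pvJoinU_head ws hws c hc
      rw [hhead]
      have hrev : (pvJoinU ws ++ ['_']).reverse = '_' :: (pvJoinU ws).reverse := by simp
      rw [hrev, List.dropWhile_cons_of_pos (by simp)]
      have hlastdrop : List.dropWhile (fun c : Char => c == '_') (pvJoinU ws).reverse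
          = (pvJoinU ws).reverse := by
        apply pvDropWhile_eq_self_of_head
        intro c hc
        rw [List.head?_reverse] at hc
        simpa using pvJoinU_last ws hws c hc
      rw [hlastdrop]
      simp [if_pos rfl]
  · have hpure : ∀ w ∈ ws ++ [buf], w ≠ [] ∧ '_' ∉ w := by
      intro w hw
      rcases List.mem_append.mp hw with h | h
      · exact hws w h
      · simp at h; subst h; exact ⟨hbe, hbuf⟩
    simp only [pvE, if_neg hbe]
    have hhead : List.dropWhile (fun c : Char => c == '_') (pvJoinU (ws ++ [buf]))
        = pvJoinU (ws ++ [buf]) := by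
      apply pvDropWhile_eq_self_of_head
      intro c hc
      simpa using pvJoinU_head (ws ++ [buf]) hpure c hc
    rw [hhead]
    have hlastdrop : List.dropWhile (fun c : Char => c == '_') (pvJoinU (ws ++ [buf])).reverse
        = (pvJoinU (ws ++ [buf])).reverse := by
      apply pvDropWhile_eq_self_of_head
      intro c hc
      rw [List.head?_reverse] at hc
      simpa using pvJoinU_last (ws ++ [buf]) hpure c hc
    rw [hlastdrop]
    simp [if_neg hbe]

theorem unicode_slug_eq (text : String) : unicode_slug text = unicode_slug_alt text := by
  unfold unicode_slug unicode_slug_alt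
  dsimp only
  obtain ⟨hws, hbuf, b, hsq⟩ := pvInv text.toList
  have hchunks : text.toList.foldl (fun acc c => acc ++ [pvTokA c]) []
      = text.toList.map pvTokA := by
    simpa using PySem.List.foldl_append_singleton_eq_map pvTokA text.toList []
  rw [hchunks, pvJoinNilFlat, pvCollapse_eq_sq, hsq, pvStrip _ _ hws hbuf b]
  set st := text.toList.foldl pvStepB ([], []) with hst
  have : (if st.2.isEmpty then st.1 else st.1 ++ [st.2])
      = (if st.2 = [] then st.1 else st.1 ++ [st.2]) := by
    by_cases h : st.2 = [] <;> simp [h]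
  rw [← this]
  rfl

-- ===== VERDICT (by name: the statement is the Claim_ definition above) =====
theorem unicode_slug_spec : Claim_equal_unicode_slug := by
  intro text _
  unfold Spec_unicode_slug
  exact unicode_slug_eq text
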